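-- pv_equiv track=rewrite | github.com/eranmaoz44/sp-stock-admin | scripts/copyPrices.py | multiply_spec_options
-- ===== SOURCE A (Python) =====
-- def multiply_spec_options(spec_options):
--     res = []
--
--     if len(spec_options) > 0:
--         smaller_res = multiply_spec_options(spec_options[1:])
--         curr_spec_name = spec_options[0][0]
--         curr_spec_option = spec_options[0][1]
--         for choice in curr_spec_option:
--             curr_choice = (curr_spec_name, choice)
--             if len(smaller_res) > 0:
--                 for smaller_choice in smaller_res:
--                     res.append(smaller_choice + (curr_choice,))
--             else:
--                 res.append((curr_choice,))
--     return res
-- ===== SOURCE B (Python) =====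
-- def multiply_spec_options(spec_options):
--     acc = []
--     for name, opts in reversed(spec_options):
--         new = []
--         for choice in opts:
--             if len(acc) > 0:
--                 for s in acc:
--                     new.append(s + ((name, choice),))
--             else:
--                 new.append(((name, choice),))
--         acc = new
--     return acc
-- ===== Notes on version B (the rewrite author's own statement) =====
-- stated objective: alternative
-- what changed: Replaces the recursion (slice the list, recurse on the tail, then combine) with an explicit bottom-up iterative fold over reversed(spec_options) maintaining an accumulator, evaluating the same recurrence without any recursion or list slicing.
import Mathlib
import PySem

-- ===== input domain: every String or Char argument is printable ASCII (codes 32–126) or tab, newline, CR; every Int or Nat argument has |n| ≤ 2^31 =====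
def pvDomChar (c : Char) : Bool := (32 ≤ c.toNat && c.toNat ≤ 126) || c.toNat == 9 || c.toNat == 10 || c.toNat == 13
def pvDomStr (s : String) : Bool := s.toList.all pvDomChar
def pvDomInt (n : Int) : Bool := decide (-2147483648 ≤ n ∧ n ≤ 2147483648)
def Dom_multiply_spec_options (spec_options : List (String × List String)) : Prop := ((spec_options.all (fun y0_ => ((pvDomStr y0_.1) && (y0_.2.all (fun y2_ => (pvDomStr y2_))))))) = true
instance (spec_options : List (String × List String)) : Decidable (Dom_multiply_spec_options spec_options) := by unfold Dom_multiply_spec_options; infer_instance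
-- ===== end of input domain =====

-- B replaces A's tail recursion (slice + recurse + combine) by an explicit bottom-up
-- iterative fold over the reversed spec list with an accumulator (objective: alternative).


-- ===== PORT A =====
-- literal transliteration of A: recurse on the tail, then for each choice of the head
-- either extend every smaller result or emit a singleton when the recursion was empty
def multiply_spec_options : List (String × List String) → List (List (String × String))
  | [] => []
  | x :: rest =>
    let smaller_res := multiply_spec_options rest
    let curr_spec_name := x.1
    let curr_spec_option := x.2
    curr_spec_option.foldl (fun res choice =>
      if smaller_res.length > 0 then
        smaller_res.foldl (fun r smaller_choice => r ++ [smaller_choice ++ [(curr_spec_name, choice)]]) res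
      else
        res ++ [[(curr_spec_name, choice)]]) []

-- ===== PORT B =====
-- one iteration of B's outer loop: rebuild the accumulator from one (name, opts) pair
def pvStepB (acc : List (List (String × String))) (p : String × List String) : List (List (String × String)) :=
  p.2.foldl (fun new choice =>
    if acc.length > 0 then
      acc.foldl (fun n s => n ++ [s ++ [(p.1, choice)]]) new
    else
      new ++ [[(p.1, choice)]]) []

def multiply_spec_options_alt (spec_options : List (String × List String)) : List (List (String × String)) :=
  spec_options.reverse.foldl pvStepB []

-- ===== PRECONDITION & SPEC =====
def Spec_multiply_spec_options (spec_options : List (String × List String)) (out : List (List (String × String))) : Prop := out = multiply_spec_options_alt spec_options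
instance (spec_options : List (String × List String)) (out : List (List (String × String))) : Decidable (Spec_multiply_spec_options spec_options out) := by unfold Spec_multiply_spec_options; infer_instance

-- ===== CLAIM (what is proved, stated in full; the proofs are below) =====
def Claim_equal_multiply_spec_options : Prop := ∀ (spec_options : List (String × List String)), Dom_multiply_spec_options spec_options → Spec_multiply_spec_options spec_options (multiply_spec_options spec_options)

-- ===== LEMMAS AND PROOFS =====
-- B's fold over the reversed list evaluates A's recurrence bottom-up.
theorem pv_fold_eq (l : List (String × List String)) :
    l.reverse.foldl pvStepB [] = multiply_spec_options l := by
  induction l with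
  | nil => rfl
  | cons x rest ih =>
    simp only [List.reverse_cons, List.foldl_append, List.foldl_cons, List.foldl_nil, ih]
    rfl

-- ===== VERDICT (by name: the statement is the Claim_ definition above) =====
theorem multiply_spec_options_spec : Claim_equal_multiply_spec_options := by
  intro l _
  exact (pv_fold_eq l).symm
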